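-- pv_equiv track=rewrite | github.com/gabriellaec/desoft-analise-exercicios | backup/user_246/ch167_2020_06_21_21_42_36_764443.py | bairro_mais_custoso
-- ===== SOURCE A (Python) =====
-- def bairro_mais_custoso(bairros):
--     soma = {}
--     nome = []
--     valor = []
--     for b in bairros:
--         total = 0
--         bairro = bairros[b]
--         bairro = bairro[6:]
--         for custo in bairro:
--             total += custo
--         valor.append(total)
--         nome.append(b)
--     bairro = nome[valor.index(max(valor))]
--     return bairro
-- ===== SOURCE B (Python) =====
-- def bairro_mais_custoso(bairros):
--     ranking = sorted(bairros.items(), key=lambda item: -sum(item[1][6:]))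
--     return ranking[0][0]
-- ===== Notes on version B (the rewrite author's own statement) =====
-- stated objective: alternative
-- what changed: Replaces A's argmax machinery (two parallel name/value lists filled by a loop, then max() plus a separate .index() scan and a list lookup) by sorting the dict items ascending by the negated summed cost of value[6:] and returning the first item's key; the stable sort preserves the first-tie winner. Pre_ excludes the empty dict, on which both raise, and duplicate keys in the association list, which cannot occur in a Python dict.
import Mathlib
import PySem

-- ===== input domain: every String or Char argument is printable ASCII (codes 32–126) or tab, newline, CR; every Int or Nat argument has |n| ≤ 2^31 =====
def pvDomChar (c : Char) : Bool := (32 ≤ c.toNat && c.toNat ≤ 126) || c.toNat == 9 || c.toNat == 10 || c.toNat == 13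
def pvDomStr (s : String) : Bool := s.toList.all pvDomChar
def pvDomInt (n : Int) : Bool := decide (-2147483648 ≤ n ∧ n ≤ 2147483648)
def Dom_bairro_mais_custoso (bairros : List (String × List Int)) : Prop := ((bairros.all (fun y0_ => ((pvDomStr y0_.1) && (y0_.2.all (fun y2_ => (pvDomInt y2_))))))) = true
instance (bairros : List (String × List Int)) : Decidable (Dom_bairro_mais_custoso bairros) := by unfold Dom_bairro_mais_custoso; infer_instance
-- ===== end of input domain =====

-- B sorts the dict items by negated summed cost of value[6:] (stable) and returns the first key, replacing A's parallel lists + max/index argmax; alternative, same asymptotic cost.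

-- ===== PORT A =====
-- A builds parallel lists nome/valor (key, summed cost of value[6:]) and returns nome[valor.index(max(valor))].
def bairro_mais_custoso (bairros : List (String × List Int)) : String :=
  let nv : List String × List Int := bairros.foldl
    (fun acc b =>
      let bairro := PySem.Dict.getD (PySem.Dict.mk bairros) b.1 []
      let bairro := PySem.List.slice bairro (some 6) none
      let total := bairro.foldl (fun total custo => total + custo) (0 : Int)
      (acc.1 ++ [b.1], acc.2 ++ [total]))
    ([], [])
  match PySem.List.max? nv.2 (fun x => x) with
  | none => ""      -- max([]) raises ValueError; excluded by Pre_
  | some m =>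
    match PySem.List.index? nv.2 m with
    | none => ""    -- unreachable: max(valor) ∈ valor
    | some i => (PySem.List.pyGet? nv.1 (i : Int)).getD ""

-- ===== PORT B =====
-- the key function of B's sort: lambda item: -sum(item[1][6:])
def pvChave (item : String × List Int) : Int :=
  -(PySem.List.slice item.2 (some 6) none).sum

def bairro_mais_custoso_alt (bairros : List (String × List Int)) : String :=
  -- ranking = sorted(bairros.items(), key=...); return ranking[0][0]
  let ranking := PySem.List.sorted bairros pvChave false
  ((PySem.List.pyGet? ranking (0 : Int)).getD ("", [])).1   -- ranking[0] raises IndexError on []; excluded by Pre_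

-- ===== PRECONDITION & SPEC =====
-- Pre_ excludes the empty dict, on which A raises ValueError (and B IndexError), and association
-- lists with duplicate keys, which cannot arise from a Python dict argument.
def Pre_bairro_mais_custoso (bairros : List (String × List Int)) : Prop :=
  bairros ≠ [] ∧ (bairros.map Prod.fst).Nodup
instance (bairros : List (String × List Int)) : Decidable (Pre_bairro_mais_custoso bairros) := by unfold Pre_bairro_mais_custoso; infer_instance
def pvWitness_bairro_mais_custoso : (List (String × List Int)) := [("a", [1, 2, 3, 4, 5, 6, 7]), ("b", [])]

def Spec_bairro_mais_custoso (bairros : List (String × List Int)) (out : String) : Prop := out = bairro_mais_custoso_alt bairros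
instance (bairros : List (String × List Int)) (out : String) : Decidable (Spec_bairro_mais_custoso bairros out) := by unfold Spec_bairro_mais_custoso; infer_instance

-- ===== CLAIM (what is proved, stated in full; the proofs are below) =====
def Claim_equal_bairro_mais_custoso : Prop := ∀ (bairros : List (String × List Int)), Dom_bairro_mais_custoso bairros → Pre_bairro_mais_custoso bairros → Spec_bairro_mais_custoso bairros (bairro_mais_custoso bairros)

-- ===== LEMMAS AND PROOFS =====

-- ---- A-side: A's selection equals the first-argmax (PySem.List.max?) over the keys ----

-- the running best of a keyed max? fold, once the accumulator is occupied
def pvBmax (f : String → Int) (cur : String) (t : List String) : String :=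
  t.foldl (fun m x => if f m < f x then x else m) cur

theorem pvBmax_nil (f : String → Int) (cur : String) : pvBmax f cur [] = cur := rfl

theorem pvBmax_cons (f : String → Int) (cur x : String) (t : List String) :
    pvBmax f cur (x :: t) = pvBmax f (if f cur < f x then x else cur) t := rfl

theorem pvMax?_cons (f : String → Int) :
    ∀ (t : List String) (k : String),
      PySem.List.max? (k :: t) f = some (pvBmax f k t) := by
  intro t
  induction t with
  | nil => intro k; rfl
  | cons x t ih =>
      intro k
      have h1 : PySem.List.max? (k :: x :: t) f
          = PySem.List.max? ((if f k < f x then x else k) :: t) f := by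
        simp only [PySem.List.max?, List.foldl]
        by_cases h : f k < f x <;> simp [h]
      rw [h1, ih, pvBmax_cons]

-- A's loop builds exactly (keys, keys.map g)
theorem pvBuild (g : String → Int) :
    ∀ (l : List (String × List Int)) (acc : List String × List Int),
      l.foldl (fun (acc : List String × List Int) (b : String × List Int) =>
          (acc.1 ++ [b.1], acc.2 ++ [g b.1])) acc
        = (acc.1 ++ l.map Prod.fst, acc.2 ++ (l.map Prod.fst).map g) := by
  intro l
  induction l with
  | nil => intro acc; simp
  | cons p l ih => intro acc; simp [List.foldl, ih]

-- first index of the running max in the mapped list points at the keyed running best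
theorem pvArgmax (f : String → Int) :
    ∀ (t : List String) (k : String),
      (PySem.List.index? ((k :: t).map f) ((t.map f).foldl max (f k))).bind
          (fun i => (k :: t)[i]?)
        = some (pvBmax f k t) := by
  intro t
  induction t with
  | nil =>
      intro k
      simp [pvBmax_nil]
  | cons x t ih =>
      intro k
      have hM : ((x :: t).map f).foldl max (f k) = (t.map f).foldl max (max (f k) (f x)) := by
        simp
      rw [show ((k :: x :: t).map f) = f k :: (x :: t).map f from rfl, hM]
      by_cases h : f k < f x
      · -- head is beaten: new best starts at x
        have hmax : max (f k) (f x) = f x := max_eq_right (le_of_lt h)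
        rw [hmax]
        have hle : f x ≤ (t.map f).foldl max (f x) := (PySem.List.le_foldl_max (t.map f) (f x)).1
        have hne : f k ≠ (t.map f).foldl max (f x) := by omega
        rw [PySem.List.index?_cons_of_ne _ hne]
        have := ih x
        cases ho : PySem.List.index? ((x :: t).map f) ((t.map f).foldl max (f x)) with
        | none => rw [ho] at this; simp at this
        | some j =>
            rw [ho] at this
            simp only [Option.bind_some] at this
            simp [pvBmax_cons, h, this]
      · -- head survives the comparison
        have hmax : max (f k) (f x) = f k := max_eq_left (by omega)
        rw [hmax]
        have := ih k
        rw [show ((k :: t).map f) = f k :: t.map f from rfl] at this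
        by_cases hk : f k = (t.map f).foldl max (f k)
        · -- the head itself is (a) maximum: index 0 on both sides
          rw [show ((x :: t).map f) = f x :: t.map f from rfl, ← hk,
              PySem.List.index?_cons_self]
          rw [← hk, PySem.List.index?_cons_self] at this
          simp only [Option.bind_some, List.getElem?_cons_zero] at this ⊢
          rw [pvBmax_cons, if_neg h]
          exact this
        · -- head (and hence x) below the max: shift indices by two
          have hkle : f k ≤ (t.map f).foldl max (f k) := (PySem.List.le_foldl_max (t.map f) (f k)).1
          have hxne : f x ≠ (t.map f).foldl max (f k) := by
            have hxk : f x ≤ f k := by omega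
            omega
          rw [show ((x :: t).map f) = f x :: t.map f from rfl,
              PySem.List.index?_cons_of_ne _ hk, PySem.List.index?_cons_of_ne _ hxne]
          rw [PySem.List.index?_cons_of_ne _ hk] at this
          cases ho : PySem.List.index? (t.map f) ((t.map f).foldl max (f k)) with
          | none => rw [ho] at this; simp at this
          | some j =>
              rw [ho] at this
              simp only [Option.map_some, Option.bind_some, List.getElem?_cons_succ] at this
              simp only [Option.map_some, Option.bind_some, List.getElem?_cons_succ]
              rw [pvBmax_cons, if_neg h]
              exact this

-- A's selection (max over the mapped values, first index, lookup) equals the keyed first-argmax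
theorem pvMain (f : String → Int) (k : String) (t : List String) :
    (match PySem.List.max? ((k :: t).map f) (fun x => x) with
     | none => ""
     | some m =>
       match PySem.List.index? ((k :: t).map f) m with
       | none => ""
       | some i => (PySem.List.pyGet? (k :: t) (i : Int)).getD "")
    = (PySem.List.max? (k :: t) f).getD "" := by
  rw [show (k :: t).map f = f k :: t.map f from rfl, PySem.List.max?_id_cons]
  have harg := pvArgmax f t k
  cases ho : PySem.List.index? ((k :: t).map f) ((t.map f).foldl max (f k)) with
  | none => rw [ho] at harg; simp at harg
  | some i =>
      rw [ho] at harg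
      simp only [Option.bind_some] at harg
      rw [show (k :: t).map f = f k :: t.map f from rfl] at ho
      show (match PySem.List.index? (f k :: t.map f) ((t.map f).foldl max (f k)) with
        | none => ""
        | some i => (PySem.List.pyGet? (k :: t) (i : Int)).getD "")
        = (PySem.List.max? (k :: t) f).getD ""
      rw [ho, pvMax?_cons]
      show (PySem.List.pyGet? (k :: t) (i : Int)).getD "" = (some (pvBmax f k t)).getD ""
      simp only [Option.getD_some, PySem.List.pyGet?_natCast]
      exact congrArg (fun o => o.getD "") harg

-- ---- B-side: the head of the stable sort is the first key-minimal element ----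

theorem pvHead_insertBy {α : Type} (before : α → α → Bool) (x : α) (acc : List α) :
    (PySem.List.insertBy before x acc).head?
      = match acc.head? with
        | none => some x
        | some m => if before x m then some x else some m := by
  cases acc with
  | nil => rfl
  | cons m t =>
      show (if before x m then x :: m :: t else m :: PySem.List.insertBy before x t).head? = _
      by_cases h : before x m <;> simp [h]

theorem pvHeadFold {α : Type} (before : α → α → Bool) :
    ∀ (l : List α) (acc : List α),
      (l.foldl (fun acc x => PySem.List.insertBy before x acc) acc).head?
        = l.foldl (fun o x => match o with
            | none => some x
            | some m => if before x m then some x else some m) acc.head? := by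
  intro l
  induction l with
  | nil => intro acc; rfl
  | cons x l ih =>
      intro acc
      simp only [List.foldl]
      rw [ih, pvHead_insertBy]

-- head of sorted(l, key) = first key-minimal element (stability)
theorem pvHeadSorted {α : Type} (key : α → Int) (l : List α) :
    (PySem.List.sorted l key false).head? = PySem.List.min? l key := by
  show ((l.foldl (fun acc x => PySem.List.insertBy (fun a b => decide (key a < key b)) x acc) []).head?) = _
  rw [pvHeadFold]
  show l.foldl _ ([] : List α).head? = l.foldl _ none
  apply PySem.List.foldl_congr_mem
  intro o x _
  cases o with
  | none => rfl
  | some m => by_cases h : key x < key m <;> simp [h]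

-- min? with the negated key is max? with the key (same first-tie winner)
theorem pvMinNeg {α : Type} (k : α → Int) (l : List α) :
    PySem.List.min? l k = PySem.List.max? l (fun x => -(k x)) := by
  show l.foldl _ none = l.foldl _ none
  apply PySem.List.foldl_congr_mem
  intro o x _
  cases o with
  | none => rfl
  | some m =>
      show (if k x < k m then some x else some m)
        = (if -(k m) < -(k x) then some x else some m)
      by_cases h : k x < k m
      · rw [if_pos h, if_pos (by omega)]
      · rw [if_neg h, if_neg (by omega)]

-- the accumulator step of PySem.List.max?, named so the fold lemmas below can cite it
def pvStep {α : Type} (f : α → Int) (o : Option α) (x : α) : Option α :=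
  match o with
  | none => some x
  | some m => if f m < f x then some x else some m

theorem pvStep_some {α : Type} (f : α → Int) (m x : α) :
    pvStep f (some m) x = if f m < f x then some x else some m := rfl

theorem pvMax?_eq_foldl_step {α : Type} (l : List α) (f : α → Int) :
    PySem.List.max? l f = l.foldl (pvStep f) none := by
  have h : (fun (acc : Option α) x => match acc with
      | none => some x
      | some m => if f m < f x then some x else some m) = pvStep f := by
    funext o x; cases o <;> rfl
  simp only [PySem.List.max?]
  exact congrArg (fun F => List.foldl F none l) h

-- max? over the keys with a key-indexed weight = fst of max? over the items
theorem pvMaxMapAux (f : String → Int) :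
    ∀ (l : List (String × List Int)) (acc : Option (String × List Int)),
      l.foldl (fun o x => pvStep f o x.1) (acc.map Prod.fst)
        = (l.foldl (pvStep (fun it => f it.1)) acc).map Prod.fst := by
  intro l
  induction l with
  | nil => intro acc; rfl
  | cons x l ih =>
      intro acc
      simp only [List.foldl]
      cases acc with
      | none => exact ih (some x)
      | some m =>
          by_cases h : f m.1 < f x.1
          · have := ih (some x)
            simp only [pvStep_some, Option.map_some, if_pos h] at this ⊢
            exact this
          · have := ih (some m)
            simp only [pvStep_some, Option.map_some, if_neg h] at this ⊢
            exact this

theorem pvMaxMap (f : String → Int) (l : List (String × List Int)) :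
    PySem.List.max? (l.map Prod.fst) f
      = (PySem.List.max? l (fun it => f it.1)).map Prod.fst := by
  rw [pvMax?_eq_foldl_step, pvMax?_eq_foldl_step, List.foldl_map]
  exact pvMaxMapAux f l none

-- max? only reads the key on members of the list (and on the running best, itself a member)
theorem pvMaxCongrAux {α : Type} (f g : α → Int) :
    ∀ (l : List α) (acc : Option α),
      (∀ m, acc = some m → f m = g m) → (∀ x ∈ l, f x = g x) →
      l.foldl (pvStep f) acc = l.foldl (pvStep g) acc := by
  intro l
  induction l with
  | nil => intro acc _ _; rfl
  | cons x l ih =>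
      intro acc hacc hmem
      have hx : f x = g x := hmem x (by simp)
      simp only [List.foldl]
      cases acc with
      | none =>
          exact ih (some x) (by intro m hm; cases hm; exact hx)
            (fun y hy => hmem y (by simp [hy]))
      | some m =>
          have hm : f m = g m := hacc m rfl
          simp only [pvStep_some]
          rw [show (if f m < f x then some x else some m)
              = (if g m < g x then some x else some m) by rw [hm, hx]]
          refine ih _ ?_ (fun y hy => hmem y (by simp [hy]))
          intro m' hm'
          by_cases h : g m < g x
          · rw [if_pos h] at hm'; cases hm'; exact hx
          · rw [if_neg h] at hm'; cases hm'; exact hm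

theorem pvMaxCongr {α : Type} (f g : α → Int) (l : List α)
    (h : ∀ x ∈ l, f x = g x) :
    PySem.List.max? l f = PySem.List.max? l g := by
  rw [pvMax?_eq_foldl_step, pvMax?_eq_foldl_step]
  exact pvMaxCongrAux f g l none (by intro m hm; cases hm) h

-- with unique keys, A's dict lookup of an item's key yields that item's own value
theorem pvCustoOwn (l : List (String × List Int)) (hnd : (l.map Prod.fst).Nodup)
    (it : String × List Int) (hit : it ∈ l) :
    (PySem.List.slice (PySem.Dict.getD (PySem.Dict.mk l) it.1 []) (some 6) none).foldl
        (fun total custo => total + custo) 0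
      = -(pvChave it) := by
  have hkeys : (PySem.Dict.mk l).keys.Nodup := by
    simpa [PySem.Dict.keys_mk] using hnd
  have hitems : (it.1, it.2) ∈ (PySem.Dict.mk l).items := by
    simpa using hit
  rw [PySem.Dict.getD_of_mem_items (PySem.Dict.mk l) hitems hkeys]
  unfold pvChave
  rw [neg_neg]
  simpa using PySem.List.foldl_add (PySem.List.slice it.2 (some 6) none) (fun x : Int => x) 0

-- ===== VERDICT (by name: the statement is the Claim_ definition above) =====
theorem bairro_mais_custoso_spec : Claim_equal_bairro_mais_custoso := by
  intro bairros _ hpre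
  obtain ⟨hne, hnd⟩ := hpre
  unfold Spec_bairro_mais_custoso
  cases hb : bairros with
  | nil => exact absurd hb hne
  | cons p rest =>
      subst hb
      -- shorthand for A's per-key weight
      set L : List (String × List Int) := p :: rest with hL
      have hcusto : ∀ it ∈ L, (fun it : String × List Int =>
          (PySem.List.slice (PySem.Dict.getD (PySem.Dict.mk L) it.1 []) (some 6) none).foldl
            (fun total custo => total + custo) 0) it = (fun it => -(pvChave it)) it := by
        intro it hit
        exact pvCustoOwn L hnd it hit
      -- A reduces to the first-argmax over the keys
      have hA : bairro_mais_custoso L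
          = (PySem.List.max? (L.map Prod.fst)
              (fun b => (PySem.List.slice (PySem.Dict.getD (PySem.Dict.mk L) b []) (some 6) none).foldl
                (fun total custo => total + custo) 0)).getD "" := by
        show (match PySem.List.max?
            (L.foldl (fun (acc : List String × List Int) (b : String × List Int) =>
                (acc.1 ++ [b.1], acc.2 ++ [(PySem.List.slice (PySem.Dict.getD (PySem.Dict.mk L) b.1 []) (some 6) none).foldl
                  (fun total custo => total + custo) 0])) ([], [])).2
            (fun x => x) with
          | none => ""
          | some m =>
            match PySem.List.index?
                (L.foldl (fun (acc : List String × List Int) (b : String × List Int) =>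
                    (acc.1 ++ [b.1], acc.2 ++ [(PySem.List.slice (PySem.Dict.getD (PySem.Dict.mk L) b.1 []) (some 6) none).foldl
                      (fun total custo => total + custo) 0])) ([], [])).2 m with
            | none => ""
            | some i => (PySem.List.pyGet?
                (L.foldl (fun (acc : List String × List Int) (b : String × List Int) =>
                    (acc.1 ++ [b.1], acc.2 ++ [(PySem.List.slice (PySem.Dict.getD (PySem.Dict.mk L) b.1 []) (some 6) none).foldl
                      (fun total custo => total + custo) 0])) ([], [])).1
                (i : Int)).getD "")
          = _
        rw [pvBuild (fun b => (PySem.List.slice (PySem.Dict.getD (PySem.Dict.mk L) b []) (some 6) none).foldl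
              (fun total custo => total + custo) 0) L ([], [])]
        simp only [List.nil_append]
        have := pvMain (fun b => (PySem.List.slice (PySem.Dict.getD (PySem.Dict.mk L) b []) (some 6) none).foldl
              (fun total custo => total + custo) 0) p.1 (rest.map Prod.fst)
        simpa [hL] using this
      rw [hA]
      -- move to max? over the items, then swap the key for the item's own cost
      rw [pvMaxMap, pvMaxCongr _ (fun it => -(pvChave it)) L hcusto, ← pvMinNeg, ← pvHeadSorted]
      -- both sides read the head of the (nonempty) sorted list
      have hsne : PySem.List.sorted L pvChave false ≠ [] := by
        rw [Ne, PySem.List.sorted_eq_nil_iff]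
        simp [hL]
      unfold bairro_mais_custoso_alt
      cases hs : PySem.List.sorted L pvChave false with
      | nil => exact absurd hs hsne
      | cons s0 srest =>
          show (some s0.1).getD "" = ((PySem.List.pyGet? (s0 :: srest) (0 : Int)).getD ("", [])).1
          simp [PySem.List.pyGet?, PySem.List.pyIdx?]
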